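-- pv_equiv track=rewrite | github.com/FengJingLiu/bayes_poker | src/bayes_poker/strategy/preflop/query.py | generate_call_to_fold_variants
-- ===== SOURCE A (Python) =====
-- def _split_tokens(history: str) -> list[str]:
--     """分割并清理行动历史 token。
--
--     Args:
--         history: 行动历史字符串
--
--     Returns:
--         清理后的 token 列表
--     """
--     if not history:
--         return []
--     return [t.strip() for t in history.split("-") if t.strip()]
--
-- def generate_call_to_fold_variants(history: str) -> list[str]:
--     """生成将 CALL 替换为 FOLD 的变体列表。
--
--     从后向前逐个替换 C 为 F，生成所有可能的变体。
--
--     Args: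
--         history: 行动历史，如 "R2-C-R6-C"
--
--     Returns:
--         变体列表，如 ["R2-C-R6-F", "R2-F-R6-F"]
--     """
--     tokens = _split_tokens(history)
--     call_indices = [i for i, t in enumerate(tokens) if t.upper() == "C"]
--
--     if not call_indices:
--         return []
--
--     variants = []
--     for num_replacements in range(1, len(call_indices) + 1):
--         new_tokens = tokens.copy()
--         indices_to_replace = call_indices[-num_replacements:]
--         for idx in indices_to_replace:
--             new_tokens[idx] = "F"
--         variants.append("-".join(new_tokens))
--
--     return variants
-- ===== SOURCE B (Python) =====
-- def _split_tokens(history: str) -> list[str]: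
--     if not history:
--         return []
--     return [t.strip() for t in history.split("-") if t.strip()]
--
-- def generate_call_to_fold_variants(history: str) -> list[str]:
--     tokens = _split_tokens(history)
--     call_indices = [i for i, t in enumerate(tokens) if t.upper() == "C"]
--     working = list(tokens)
--     variants = []
--     for idx in reversed(call_indices):
--         working[idx] = "F"
--         variants.append("-".join(working))
--     return variants
-- ===== Notes on version B (the rewrite author's own statement) =====
-- stated objective: simpler
-- what changed: Instead of recopying the token list and re-replacing the last m calls for every m (nested loops over a slice), B keeps one mutable working copy and walks the call indices once in reverse, flipping one token per step and emitting the join.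
import Mathlib
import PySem

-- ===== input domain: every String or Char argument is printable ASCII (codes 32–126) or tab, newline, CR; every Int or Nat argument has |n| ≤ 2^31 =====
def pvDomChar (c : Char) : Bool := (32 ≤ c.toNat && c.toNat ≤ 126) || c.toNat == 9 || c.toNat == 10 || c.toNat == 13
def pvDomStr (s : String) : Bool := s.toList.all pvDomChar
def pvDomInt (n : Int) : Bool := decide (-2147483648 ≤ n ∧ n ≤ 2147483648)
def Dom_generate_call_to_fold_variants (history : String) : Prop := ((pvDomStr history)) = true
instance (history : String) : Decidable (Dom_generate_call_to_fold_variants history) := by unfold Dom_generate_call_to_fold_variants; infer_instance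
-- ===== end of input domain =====

-- B replaces A's nested recopy-and-re-replace loops by a single reverse pass over the call
-- indices with one accumulating working copy (objective: simpler).


-- ===== PORT A =====
-- _split_tokens (shared helper of both Python files, identical there)
def pvSplitTokens (history : String) : List String :=
  if history = "" then []
  else ((PySem.Str.split? history "-").getD []).filterMap
    (fun t => let s := PySem.Str.strip t; if s = "" then none else some s)

-- call_indices (computed identically in both Python files)
def pvCallIndices (tokens : List String) : List Int :=
  (PySem.List.enumerate tokens 0).filterMap
    (fun p => if PySem.Str.upper p.2 = "C" then some p.1 else none)

def generate_call_to_fold_variants (history : String) : List String :=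
  let tokens := pvSplitTokens history
  let call_indices := pvCallIndices tokens
  if call_indices = [] then []
  else
    (PySem.List.pyRange 1 ((call_indices.length : Int) + 1) 1).foldl
      (fun variants num =>
        let new_tokens :=
          (PySem.List.slice call_indices (some (-num)) none).foldl
            (fun l idx => PySem.List.pySetD l idx "F") tokens
        variants ++ [PySem.Str.join "-" new_tokens]) []

-- ===== PORT B =====
-- the reverse pass: flip one call index per step in the working copy, emit the join
def pvAltLoop (working : List String) (rs : List Int) : List String :=
  match rs with
  | [] => []
  | r :: rs' =>
    let w := PySem.List.pySetD working r "F"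
    PySem.Str.join "-" w :: pvAltLoop w rs'

def generate_call_to_fold_variants_alt (history : String) : List String :=
  let tokens := pvSplitTokens history
  let call_indices := pvCallIndices tokens
  pvAltLoop tokens call_indices.reverse

-- ===== PRECONDITION & SPEC =====
def Spec_generate_call_to_fold_variants (history : String) (out : List String) : Prop := out = generate_call_to_fold_variants_alt history
instance (history : String) (out : List String) : Decidable (Spec_generate_call_to_fold_variants history out) := by unfold Spec_generate_call_to_fold_variants; infer_instance

-- ===== CLAIM (what is proved, stated in full; the proofs are below) =====
def Claim_equal_generate_call_to_fold_variants : Prop := ∀ (history : String), Dom_generate_call_to_fold_variants history → Spec_generate_call_to_fold_variants history (generate_call_to_fold_variants history)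

-- ===== LEMMAS AND PROOFS =====

-- applying "F" at a list of indices (A's inner loop)
def pvApplyF (xs : List String) (l : List Int) : List String :=
  l.foldl (fun a j => PySem.List.pySetD a j "F") xs

theorem pvSetD_comm {α : Type} (xs : List α) (i j : Int) (v : α) :
    PySem.List.pySetD (PySem.List.pySetD xs i v) j v
      = PySem.List.pySetD (PySem.List.pySetD xs j v) i v := by
  unfold PySem.List.pySetD PySem.List.pySet?
  rcases h1 : PySem.List.pyIdx? xs.length i with _ | k1 <;>
  rcases h2 : PySem.List.pyIdx? xs.length j with _ | k2 <;>
  simp [h1, h2, List.length_set]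
  rcases eq_or_ne k1 k2 with h | h
  · simp [h, List.set_set]
  · exact List.set_comm v v h

theorem pvApplyF_setD (l : List Int) (xs : List String) (i : Int) :
    pvApplyF (PySem.List.pySetD xs i "F") l
      = PySem.List.pySetD (pvApplyF xs l) i "F" := by
  induction l generalizing xs with
  | nil => rfl
  | cons r l ih =>
    simp only [pvApplyF, List.foldl_cons] at *
    rw [pvSetD_comm, ih]

theorem pvApplyF_reverse (l : List Int) (xs : List String) :
    pvApplyF xs l.reverse = pvApplyF xs l := by
  induction l generalizing xs with
  | nil => rfl
  | cons r l ih =>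
    simp only [List.reverse_cons, pvApplyF, List.foldl_append, List.foldl_cons, List.foldl_nil]
    have := pvApplyF_setD l xs r
    simp only [pvApplyF] at this ih ⊢
    rw [ih, this]

theorem pvAltLoop_eq (rs : List Int) (w : List String) :
    pvAltLoop w rs
      = (List.range rs.length).map
          (fun j => PySem.Str.join "-" (pvApplyF w (rs.take (j + 1)))) := by
  induction rs generalizing w with
  | nil => rfl
  | cons r rs ih =>
    simp only [pvAltLoop, List.length_cons, List.range_succ_eq_map, List.map_cons, List.map_map]
    refine List.cons_eq_cons.mpr ⟨rfl, ?_⟩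
    rw [ih]
    refine List.map_congr_left (fun j _ => ?_)
    simp only [Function.comp, Nat.succ_eq_add_one, List.take_succ_cons, pvApplyF, List.foldl_cons]

-- ===== VERDICT (by name: the statement is the Claim_ definition above) =====
theorem generate_call_to_fold_variants_spec : Claim_equal_generate_call_to_fold_variants := by
  intro history _
  unfold Spec_generate_call_to_fold_variants
  unfold generate_call_to_fold_variants generate_call_to_fold_variants_alt
  by_cases hc : pvCallIndices (pvSplitTokens history) = []
  · simp [hc, pvAltLoop]
  · rw [if_neg hc, pvAltLoop_eq, PySem.List.pyRange_one]
    have hlen : (((pvCallIndices (pvSplitTokens history)).length : Int) + 1 - 1).toNat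
        = (pvCallIndices (pvSplitTokens history)).length := by simp
    rw [hlen, List.foldl_map, PySem.List.foldl_append_singleton_eq_map, List.nil_append,
        List.length_reverse]
    refine List.map_congr_left (fun j hj => ?_)
    have hneg : -(1 + (j : Int)) = -(((j + 1 : Nat) : Int)) := by push_cast; ring
    rw [hneg, PySem.List.slice_from_neg_natCast _ (j + 1) (Nat.succ_pos j),
        List.take_reverse, pvApplyF_reverse]
    rfl
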